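-- pv_equiv track=rewrite | github.com/Pancio-code/Fondamenti-informatica-I | laboratorio/soluzioni lab/Esercitazione07ConSoluzioni/A_Ex5.py | A_Ex5
-- ===== SOURCE A (Python) =====
-- def A_Ex5(l):
--     r=[]
--     for elem1 in l:
--         cont=0
--         for elem2 in l:
--             if len(elem1)==len(elem2):
--                 cont=cont+1
--         r.append((elem1,cont))
--     return r
-- ===== SOURCE B (Python) =====
-- def A_Ex5(l):
--     freq = {}
--     for e in l:
--         k = len(e)
--         freq[k] = freq.get(k, 0) + 1
--     return [(e, freq[len(e)]) for e in l]
-- ===== Notes on version B (the rewrite author's own statement) =====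
-- stated objective: faster
-- what changed: Replaces the nested rescan of the whole list per element by a single pass building a length-frequency dictionary, then one map pass looking the counts up.
import Mathlib
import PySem

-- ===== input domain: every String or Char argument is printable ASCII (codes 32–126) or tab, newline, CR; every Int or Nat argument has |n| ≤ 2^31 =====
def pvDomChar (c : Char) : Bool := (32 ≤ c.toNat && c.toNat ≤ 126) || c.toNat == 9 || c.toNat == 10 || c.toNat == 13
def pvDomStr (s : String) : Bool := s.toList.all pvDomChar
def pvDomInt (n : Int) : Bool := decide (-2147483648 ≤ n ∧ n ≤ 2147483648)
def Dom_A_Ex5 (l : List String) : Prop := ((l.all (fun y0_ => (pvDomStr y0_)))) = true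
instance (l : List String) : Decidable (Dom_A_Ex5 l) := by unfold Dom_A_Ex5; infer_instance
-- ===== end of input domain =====

-- B replaces A's quadratic rescan by a one-pass length-frequency dictionary plus a lookup pass (faster in a timing run).

-- ===== PORT A =====
def A_Ex5 (l : List String) : List (String × Int) :=
  l.foldl (fun r elem1 =>
    r ++ [(elem1,
      l.foldl (fun cont elem2 =>
        if PySem.Str.len elem1 = PySem.Str.len elem2 then cont + 1 else cont) (0 : Int))]) []

-- ===== PORT B =====
def A_Ex5_alt (l : List String) : List (String × Int) :=
  let freq : PySem.Dict Int Int :=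
    l.foldl (fun d e =>
      let k := PySem.Str.len e
      d.insert k (d.getD k 0 + 1)) PySem.Dict.empty
  l.map (fun e => (e, freq.getD (PySem.Str.len e) 0))

-- ===== PRECONDITION & SPEC =====
def Spec_A_Ex5 (l : List String) (out : List (String × Int)) : Prop := out = A_Ex5_alt l
instance (l : List String) (out : List (String × Int)) : Decidable (Spec_A_Ex5 l out) := by unfold Spec_A_Ex5; infer_instance

-- ===== CLAIM (what is proved, stated in full; the proofs are below) =====
def Claim_equal_A_Ex5 : Prop := ∀ (l : List String), Dom_A_Ex5 l → Spec_A_Ex5 l (A_Ex5 l)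

-- ===== LEMMAS AND PROOFS =====

-- A's outer append-loop is a map.
theorem pv_foldl_append_map {α β : Type} (l : List α) (f : α → β) (init : List β) :
    l.foldl (fun r x => r ++ [f x]) init = init ++ l.map f := by
  induction l generalizing init with
  | nil => simp
  | cons x xs ih => simp [List.foldl_cons, ih, List.append_assoc]

-- A's inner counting loop counts equal lengths.
theorem pv_inner_count (l : List String) (k : Int) (init : Int) :
    l.foldl (fun cont e => if k = PySem.Str.len e then cont + 1 else cont) init
      = init + ((l.map PySem.Str.len).count k : Int) := by
  induction l generalizing init with
  | nil => simp
  | cons x xs ih =>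
    rw [List.foldl_cons, ih, List.map_cons, List.count_cons]
    split_ifs <;> simp_all <;> push_cast <;> omega

-- B's dictionary is the Counter of the lengths.
theorem pv_freq_eq_counter (l : List String) :
    l.foldl (fun d e =>
      let k := PySem.Str.len e
      d.insert k (d.getD k 0 + 1)) PySem.Dict.empty
      = PySem.Dict.counter (l.map PySem.Str.len) := by
  rw [← PySem.Dict.foldl_insert_getD_add_one_eq_counter, List.foldl_map]

-- ===== VERDICT (by name: the statement is the Claim_ definition above) =====
theorem A_Ex5_spec : Claim_equal_A_Ex5 := by
  intro l _
  unfold Spec_A_Ex5 A_Ex5 A_Ex5_alt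
  rw [pv_freq_eq_counter, pv_foldl_append_map]
  simp only [List.nil_append]
  apply List.map_congr_left
  intro e _
  rw [pv_inner_count, PySem.Dict.getD_counter]
  simp
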